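-- pv_equiv track=rewrite | github.com/tterb/advent-of-code | 2020/day7.py | get_containers
-- ===== SOURCE A (Python) =====
-- def get_containers(vertices, edges, target):
--     containers = set([])
--     for src in vertices:
--         if src == target:
--             continue
--         visited = {key:False for key in vertices}
--         # dfs(src, target, edges, visited, [])
--         [containers.add(i) for i in dfs(src, target, edges, visited, [])]
--     if target in containers:
--         containers.remove(target)
--     return containers
--
-- def dfs(src, dest, edges, visited, path):
--     visited[src] = True
--     path.append(src)
--     if src == dest:
--         return path
--     elif len(edges[src]):
--         for i in edges[src]:
--             if not visited[i]:
--                 return dfs(i, dest, edges, visited, path)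
--     else:
--         return []
--     path.pop()
--     visited[src] = False
--     return []
-- ===== SOURCE B (Python) =====
-- def get_containers(vertices, edges, target):
--     containers = set()
--     for src in vertices:
--         if src != target:
--             containers.update(walk(src, target, edges))
--     containers.discard(target)
--     return containers
--
-- def walk(src, target, edges):
--     seen = {src}
--     path = [src]
--     cur = src
--     while cur != target:
--         nxt = next((n for n in edges[cur] if n not in seen), None)
--         if nxt is None:
--             return []
--         seen.add(nxt)
--         path.append(nxt)
--         cur = nxt
--     return path
-- ===== Notes on version B (the rewrite author's own statement) =====
-- stated objective: simpler
-- what changed: The mutating recursive dfs with a per-walk all-vertices boolean dict is replaced by a self-contained iterative walk helper that follows the first not-yet-seen neighbor using a growing set of walked nodes, with the caller unioning each successful path into the result.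
-- outside the precondition, e.g. on get_containers(['a', 'b'], {'a': ['b', 'q']}, 'b'): A returns {'a'}, B returns {'a'}
import Mathlib
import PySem

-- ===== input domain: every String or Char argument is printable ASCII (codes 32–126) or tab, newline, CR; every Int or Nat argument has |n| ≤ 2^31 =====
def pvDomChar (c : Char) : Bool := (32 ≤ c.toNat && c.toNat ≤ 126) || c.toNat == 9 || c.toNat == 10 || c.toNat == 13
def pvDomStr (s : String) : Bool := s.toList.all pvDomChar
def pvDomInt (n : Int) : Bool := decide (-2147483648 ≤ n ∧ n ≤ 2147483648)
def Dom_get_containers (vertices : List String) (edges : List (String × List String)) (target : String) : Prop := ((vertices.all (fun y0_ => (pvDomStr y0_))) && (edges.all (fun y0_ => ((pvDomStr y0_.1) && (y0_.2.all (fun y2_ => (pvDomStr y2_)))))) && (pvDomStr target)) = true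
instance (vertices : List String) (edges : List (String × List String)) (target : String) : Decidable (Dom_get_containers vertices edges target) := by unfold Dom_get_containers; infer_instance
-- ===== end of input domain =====

-- B replaces the mutating recursive dfs + per-walk all-vertices boolean dict by a self-contained
-- iterative walk helper with a growing seen-set; return values agree on Pre_ (equal as sets and lists).

-- ===== PORT A =====
-- scan 'for i in edges[src]: if not visited[i]: return dfs(…)': first unvisited neighbor;
-- outer none = KeyError on visited[i], some none = loop fell through
def pvFirstUnvis (visited : PySem.Dict String Bool) : List String → Option (Option String)
  | [] => some none
  | i :: rest =>
    match visited.get? i with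
    | none => none
    | some b => if b then pvFirstUnvis visited rest else some (some i)

-- dfs(src, dest, edges, visited, path); none = KeyError; fuel (|vertices|+1 at the call site) only
-- makes the recursion structural — each call marks a fresh vertex visited, so it never runs out
def pvDfs : Nat → String → String → PySem.Dict String (List String) → PySem.Dict String Bool → List String → Option (List String)
  | 0, _, _, _, _, _ => some []
  | fuel+1, src, dest, edges, visited, path =>
    let visited := visited.insert src true
    let path := path ++ [src]
    if src = dest then some path
    else
      match edges.get? src with
      | none => none
      | some ns =>
        if ns.length ≠ 0 then
          match pvFirstUnvis visited ns with
          | none => none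
          | some (some i) => pvDfs fuel i dest edges visited path
          | some none => some []   -- loop finished: path.pop(); visited[src] = False; return []
        else some []

-- get_containers body; none = KeyError propagating out
def pvRunA (vertices : List String) (edges : List (String × List String)) (target : String) : Option (List String) :=
  let ed : PySem.Dict String (List String) := PySem.Dict.mk edges
  (vertices.foldlM (fun acc src =>
      if src = target then some acc
      else
        (pvDfs (vertices.length + 1) src target ed
            (vertices.foldl (fun d k => d.insert k false) PySem.Dict.empty) []).map
          (fun p => p.foldl PySem.Set.add acc))
    PySem.Set.empty).map
    (fun containers =>
      if PySem.Set.contains containers target then PySem.Set.discard containers target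
      else containers)

def get_containers (vertices : List String) (edges : List (String × List String)) (target : String) : List String :=
  (pvRunA vertices edges target).getD []

-- ===== PORT B =====
-- walk(src, target, edges): iterative first-unseen-neighbor walk; none = KeyError on edges[cur];
-- the while loop runs as fuel recursion (|vertices|+1 suffices: each step adds a new node to seen)
def pvWalk : Nat → String → String → PySem.Dict String (List String) → PySem.Set String → List String → Option (List String)
  | 0, _, _, _, _, _ => some []
  | fuel+1, cur, tgt, edges, seen, path =>
    if cur = tgt then some path
    else
      match edges.get? cur with
      | none => none
      | some ns =>
        match ns.find? (fun n => !(PySem.Set.contains seen n)) with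
        | none => some []
        | some n => pvWalk fuel n tgt edges (PySem.Set.add seen n) (path ++ [n])

def pvRunB (vertices : List String) (edges : List (String × List String)) (target : String) : Option (List String) :=
  let ed : PySem.Dict String (List String) := PySem.Dict.mk edges
  (vertices.foldlM (fun acc src =>
      if src = target then some acc
      else
        (pvWalk (vertices.length + 1) src target ed (PySem.Set.ofList [src]) [src]).map
          (fun p => PySem.Set.update acc p))
    PySem.Set.empty).map
    (fun containers => PySem.Set.discard containers target)

def get_containers_alt (vertices : List String) (edges : List (String × List String)) (target : String) : List String :=
  (pvRunB vertices edges target).getD []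

-- ===== PRECONDITION & SPEC =====
-- Pre_ excludes exactly the KeyError risks of A's walk: every non-target vertex must have an edge
-- entry whose neighbors all lie in vertices. This slightly over-excludes: A happens to return when
-- an out-of-vertices neighbor sits after the walk's chosen neighbor and is never examined (see cites).
def Pre_get_containers (vertices : List String) (edges : List (String × List String)) (target : String) : Prop :=
  ∀ v ∈ vertices, v ≠ target →
    ((PySem.Dict.mk edges).get? v).isSome = true ∧
    ∀ n ∈ ((PySem.Dict.mk edges).get? v).getD [], n ∈ vertices

instance (vertices : List String) (edges : List (String × List String)) (target : String) : Decidable (Pre_get_containers vertices edges target) := by unfold Pre_get_containers; infer_instance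

def pvWitness_get_containers : List String × (List (String × List String)) × String :=
  (["a", "b", "c"], [("a", ["b"]), ("b", ["c"]), ("c", [])], "c")

def Spec_get_containers (vertices : List String) (edges : List (String × List String)) (target : String) (out : List String) : Prop := out = get_containers_alt vertices edges target
instance (vertices : List String) (edges : List (String × List String)) (target : String) (out : List String) : Decidable (Spec_get_containers vertices edges target out) := by unfold Spec_get_containers; infer_instance

-- ===== CLAIM (what is proved, stated in full; the proofs are below) =====
def Claim_equal_get_containers : Prop := ∀ (vertices : List String) (edges : List (String × List String)) (target : String), Dom_get_containers vertices edges target → Pre_get_containers vertices edges target → Spec_get_containers vertices edges target (get_containers vertices edges target)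

-- ===== LEMMAS AND PROOFS =====

-- visited dict with value b ↔ membership of b-marked nodes in seen, keys = vertices
def pvInv (vertices : List String) (visited : PySem.Dict String Bool) (seen : PySem.Set String) : Prop :=
  ∀ k, visited.get? k = if k ∈ vertices then some (PySem.Set.contains seen k) else none

lemma pvInv_init (vertices : List String) :
    pvInv vertices (vertices.foldl (fun d k => d.insert k false) PySem.Dict.empty) PySem.Set.empty := by
  have H : forall (vs : List String) (d0 : PySem.Dict String Bool) (k : String),
      ((vs.foldl (fun d k => d.insert k false) d0).get? k)
        = if k ∈ vs then some false else d0.get? k := by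
    intro vs
    induction vs with
    | nil => intro d0 k; simp
    | cons a rest ih =>
      intro d0 k
      simp only [List.foldl_cons]
      rw [ih (d0.insert a false) k]
      by_cases hk : k ∈ rest
      · simp [hk]
      · by_cases ha : k = a
        · subst ha; simp [hk, PySem.Dict.get?_insert_self]
        · simp [hk, ha, PySem.Dict.get?_insert_of_ne _ _ ha]
  intro k
  rw [H vertices PySem.Dict.empty k]
  by_cases hv : k ∈ vertices <;> simp [hv]

lemma pvInv_step (vertices : List String) (visited : PySem.Dict String Bool)
    (seen : PySem.Set String) (src : String) (hs : src ∈ vertices) (h : pvInv vertices visited seen) :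
    pvInv vertices (visited.insert src true) (PySem.Set.add seen src) := by
  intro k
  rw [PySem.Dict.get?_insert]
  by_cases hk : k = src
  · subst hk; simp [hs, PySem.Set.contains, PySem.Set.mem_add]
  · rw [if_neg hk, h k]
    by_cases hv : k ∈ vertices
    · simp [hv, PySem.Set.contains, PySem.Set.mem_add, hk]
    · simp [hv]

lemma pvFirstUnvis_eq (visited : PySem.Dict String Bool) (seen : PySem.Set String)
    (ns : List String) (h : forall n, n ∈ ns → visited.get? n = some (PySem.Set.contains seen n)) :
    pvFirstUnvis visited ns = some (ns.find? (fun n => !(PySem.Set.contains seen n))) := by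
  induction ns with
  | nil => rfl
  | cons i rest ih =>
    have hi := h i (by simp)
    rw [pvFirstUnvis, hi, List.find?_cons]
    cases hb : PySem.Set.contains seen i with
    | true => simpa using ih (fun n hn => h n (by simp [hn]))
    | false => simp

lemma pvWalk_eq (vertices : List String) (ed : PySem.Dict String (List String)) (target : String)
    (hE : forall v, v ∈ vertices → v ≠ target → ∃ ns, ed.get? v = some ns ∧ forall n, n ∈ ns → n ∈ vertices) :
    forall (fuel : Nat) (src : String) (visited : PySem.Dict String Bool) (seen : PySem.Set String)
      (path : List String), src ∈ vertices → pvInv vertices visited seen →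
      pvDfs fuel src target ed visited path
        = pvWalk fuel src target ed (PySem.Set.add seen src) (path ++ [src]) := by
  intro fuel
  induction fuel with
  | zero => intro src visited seen path _ _; rfl
  | succ fuel ih =>
    intro src visited seen path hs hInv
    have hInv2 := pvInv_step vertices visited seen src hs hInv
    rw [pvDfs, pvWalk]
    by_cases ht : src = target
    · simp [ht]
    · obtain ⟨ns, hget, hns⟩ := hE src hs ht
      simp only [ht, if_false, hget]
      have hvals : forall n, n ∈ ns → (visited.insert src true).get? n
          = some (PySem.Set.contains (PySem.Set.add seen src) n) := by
        intro n hn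
        rw [hInv2 n, if_pos (hns n hn)]
      cases ns with
      | nil => simp
      | cons n0 rest =>
        have hlen : (n0 :: rest).length ≠ 0 := by simp
        rw [if_pos hlen, pvFirstUnvis_eq _ _ _ hvals]
        cases hf : (n0 :: rest).find? (fun n => !(PySem.Set.contains (PySem.Set.add seen src) n)) with
        | none => simp
        | some i =>
          have hi : i ∈ vertices := hns i (List.mem_of_find?_eq_some hf)
          simpa using ih i (visited.insert src true) (PySem.Set.add seen src) (path ++ [src]) hi hInv2

lemma pvFoldlM_congr_mem {α β : Type} (l : List α) (f g : β → α → Option β)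
    (h : forall a, a ∈ l → forall b, f b a = g b a) : forall init, l.foldlM f init = l.foldlM g init := by
  induction l with
  | nil => intro init; rfl
  | cons a rest ih =>
    intro init
    simp only [List.foldlM_cons]
    rw [h a (by simp) init]
    cases g init a with
    | none => rfl
    | some b => simpa using ih (fun x hx c => h x (by simp [hx]) c) b

lemma pvDiscard_not_mem (s : PySem.Set String) (x : String)
    (h : PySem.Set.contains s x = false) : PySem.Set.discard s x = s := by
  simp [PySem.Set.contains] at h
  unfold PySem.Set.discard
  rw [List.filter_eq_self]
  intro a ha
  simp
  exact fun e => h (e ▸ ha)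

lemma pvRun_eq (vertices : List String) (edges : List (String × List String)) (target : String)
    (hP : Pre_get_containers vertices edges target) :
    pvRunA vertices edges target = pvRunB vertices edges target := by
  have hE : forall v, v ∈ vertices → v ≠ target →
      ∃ ns, (PySem.Dict.mk edges).get? v = some ns ∧ forall n, n ∈ ns → n ∈ vertices := by
    intro v hv hvt
    obtain ⟨h1, h2⟩ := hP v hv hvt
    cases hq : (PySem.Dict.mk edges).get? v with
    | none => rw [hq] at h1; simp at h1
    | some ns => exact ⟨ns, rfl, by simpa [hq] using h2⟩
  unfold pvRunA pvRunB
  dsimp only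
  rw [pvFoldlM_congr_mem vertices _ (fun acc src =>
      if src = target then some acc
      else
        (pvWalk (vertices.length + 1) src target (PySem.Dict.mk edges) (PySem.Set.ofList [src]) [src]).map
          (fun p => PySem.Set.update acc p))]
  · cases (vertices.foldlM (fun acc src =>
        if src = target then some acc
        else
          (pvWalk (vertices.length + 1) src target (PySem.Dict.mk edges) (PySem.Set.ofList [src]) [src]).map
            (fun p => PySem.Set.update acc p)) PySem.Set.empty) with
    | none => rfl
    | some containers =>
      simp only [Option.map_some]
      by_cases hc : PySem.Set.contains containers target = true
      · rw [if_pos hc]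
      · simp only [Bool.not_eq_true] at hc
        rw [if_neg (by rw [hc]; exact Bool.false_ne_true), pvDiscard_not_mem containers target hc]
  · intro src hsrc acc
    by_cases ht : src = target
    · simp [ht]
    · simp only [ht, if_false]
      rw [pvWalk_eq vertices (PySem.Dict.mk edges) target hE (vertices.length + 1) src
        (vertices.foldl (fun d k => d.insert k false) PySem.Dict.empty) PySem.Set.empty []
        hsrc (pvInv_init vertices)]
      rfl

-- ===== VERDICT (by name: the statement is the Claim_ definition above) =====
theorem get_containers_spec : Claim_equal_get_containers := by
  intro vertices edges target _ hP
  unfold Spec_get_containers get_containers get_containers_alt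
  rw [pvRun_eq vertices edges target hP]
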